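-- pv_equiv track=rewrite | github.com/tedhabeck/mcp-context-forge | mcpgateway/toolops/enrichment/python_tool_enrichment/enrichment_utils/tool/utils.py | contains_any_from_nested_lists
-- ===== SOURCE A (Python) =====
-- def is_consecutive_subsequence(subsequence, main_sequence):
--     """Check if subsequence appears as a consecutive subsequence within main_sequence."""
--     if len(subsequence) == 0:
--         return True
--     if len(subsequence) > len(main_sequence):
--         return False
--
--     # Check all possible consecutive positions
--     for i in range(len(main_sequence) - len(subsequence) + 1):
--         # Check if the subsequence matches starting at position i
--         if main_sequence[i : i + len(subsequence)] == subsequence: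
--             return True
--
--     return False
--
-- def contains_any_from_nested_lists(string_list, nested_lists):
--     """Alternative implementation using list comprehension and any()."""
--     # If nested_lists is empty, return True (no patterns to match against)
--     if not nested_lists:
--         return True
--
--     # Check if all sublists are empty (no meaningful patterns to match against)
--     if all(len(sublist) == 0 for sublist in nested_lists):
--         return True
--
--     return any(
--         is_consecutive_subsequence(sublist, string_list)
--         for sublist in nested_lists
--         if sublist
--     )
-- ===== SOURCE B (Python) =====
-- def _is_prefix(pattern, seq):
--     """Element-wise: is pattern a prefix of seq?"""
--     if len(pattern) > len(seq):
--         return False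
--     for x, y in zip(pattern, seq):
--         if x != y:
--             return False
--     return True
--
-- def contains_any_from_nested_lists(string_list, nested_lists):
--     """Single left-to-right sweep over the suffixes of string_list, testing all
--     non-empty patterns at once by element-wise prefix comparison (loop order
--     swapped: text outer, patterns inner; no per-position slice allocation)."""
--     if not nested_lists:
--         return True
--     patterns = [p for p in nested_lists if p]
--     if not patterns:
--         return True
--     suffix = string_list
--     while suffix:
--         if any(_is_prefix(p, suffix) for p in patterns):
--             return True
--         suffix = suffix[1:]
--     return False
-- ===== Notes on version B (the rewrite author's own statement) =====
-- stated objective: alternative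
-- what changed: A loops over patterns and, per pattern, over start indices comparing a fresh slice against the pattern; B swaps the loop order into a single left-to-right sweep over the suffixes of string_list, testing all non-empty patterns at each position by element-wise prefix comparison with early exit.
import Mathlib
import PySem

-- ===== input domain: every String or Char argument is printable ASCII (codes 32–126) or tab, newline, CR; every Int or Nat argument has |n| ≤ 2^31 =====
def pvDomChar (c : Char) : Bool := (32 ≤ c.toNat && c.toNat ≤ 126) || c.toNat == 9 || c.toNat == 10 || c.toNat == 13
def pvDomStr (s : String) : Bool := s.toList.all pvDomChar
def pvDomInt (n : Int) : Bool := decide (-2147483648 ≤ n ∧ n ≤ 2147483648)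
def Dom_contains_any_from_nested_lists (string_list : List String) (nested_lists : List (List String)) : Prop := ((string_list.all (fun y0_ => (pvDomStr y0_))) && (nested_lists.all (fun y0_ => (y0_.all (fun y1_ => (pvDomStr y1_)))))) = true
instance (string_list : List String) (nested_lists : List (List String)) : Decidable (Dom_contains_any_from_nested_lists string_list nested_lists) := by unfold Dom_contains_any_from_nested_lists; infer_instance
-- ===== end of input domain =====

-- B replaces A's per-pattern slice-and-compare scan by one left-to-right sweep over the
-- suffixes of string_list, testing all non-empty patterns at each position by element-wise
-- prefix comparison (objective: alternative traversal; no speed claim).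


-- ===== PORT A =====
def is_consecutive_subsequence (subsequence main_sequence : List String) : Bool :=
  if subsequence.length = 0 then true
  else if subsequence.length > main_sequence.length then false
  else
    -- for i in range(len(main_sequence) - len(subsequence) + 1): if main_sequence[i:i+len(subsequence)] == subsequence: return True
    (PySem.List.pyRange 0 ((main_sequence.length : Int) - (subsequence.length : Int) + 1) 1).any
      (fun i => PySem.List.slice main_sequence (some i) (some (i + (subsequence.length : Int))) == subsequence)

def contains_any_from_nested_lists (string_list : List String) (nested_lists : List (List String)) : Bool :=
  if nested_lists.isEmpty then true
  else if nested_lists.all (fun sublist => sublist.length = 0) then true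
  else (nested_lists.filter (fun sublist => !sublist.isEmpty)).any
    (fun sublist => is_consecutive_subsequence sublist string_list)

-- ===== PORT B =====
def pvIsPrefix (pattern seq : List String) : Bool :=
  if pattern.length > seq.length then false
  else (pattern.zip seq).all (fun xy => xy.1 == xy.2)

def pvScan (patterns : List (List String)) : List String → Bool
  | [] => false
  | x :: t => patterns.any (fun p => pvIsPrefix p (x :: t)) || pvScan patterns t

def contains_any_from_nested_lists_alt (string_list : List String) (nested_lists : List (List String)) : Bool :=
  if nested_lists.isEmpty then true
  else
    let patterns := nested_lists.filter (fun p => !p.isEmpty)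
    if patterns.isEmpty then true
    else pvScan patterns string_list

-- ===== PRECONDITION & SPEC =====
def Spec_contains_any_from_nested_lists (string_list : List String) (nested_lists : List (List String)) (out : Bool) : Prop := out = contains_any_from_nested_lists_alt string_list nested_lists
instance (string_list : List String) (nested_lists : List (List String)) (out : Bool) : Decidable (Spec_contains_any_from_nested_lists string_list nested_lists out) := by unfold Spec_contains_any_from_nested_lists; infer_instance

-- ===== CLAIM (what is proved, stated in full; the proofs are below) =====
def Claim_equal_contains_any_from_nested_lists : Prop := ∀ (string_list : List String) (nested_lists : List (List String)), Dom_contains_any_from_nested_lists string_list nested_lists → Spec_contains_any_from_nested_lists string_list nested_lists (contains_any_from_nested_lists string_list nested_lists)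

-- ===== LEMMAS AND PROOFS =====

-- B's prefix test decides List.IsPrefix.
theorem pvIsPrefix_iff (p s : List String) : pvIsPrefix p s = true ↔ p <+: s := by
  induction p generalizing s with
  | nil => simp [pvIsPrefix]
  | cons a p' ih =>
    cases s with
    | nil => simp [pvIsPrefix]
    | cons b s' =>
      by_cases h : p'.length > s'.length
      · simp only [pvIsPrefix, List.length_cons]
        rw [if_pos (by omega)]
        simp only [Bool.false_eq_true, false_iff]
        intro hpre
        have := hpre.length_le
        simp at this; omega
      · simp only [pvIsPrefix, List.length_cons]
        rw [if_neg (by omega)]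
        have hrec : (p'.zip s').all (fun xy => xy.1 == xy.2) = pvIsPrefix p' s' := by
          simp [pvIsPrefix, h]
        simp only [List.zip_cons_cons, List.all_cons, hrec, Bool.and_eq_true, beq_iff_eq, ih,
          List.cons_prefix_cons]

-- B's sweep over suffixes finds exactly the patterns occurring as contiguous runs.
theorem pvScan_iff (pats : List (List String)) (s : List String)
    (hne : ∀ p ∈ pats, p ≠ []) : pvScan pats s = true ↔ ∃ p ∈ pats, p <:+: s := by
  induction s with
  | nil =>
    simp only [pvScan, Bool.false_eq_true, false_iff]
    rintro ⟨p, hp, hinf⟩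
    exact hne p hp (List.infix_nil.mp hinf)
  | cons x t ih =>
    simp only [pvScan, Bool.or_eq_true, List.any_eq_true, pvIsPrefix_iff, ih]
    constructor
    · rintro (⟨p, hp, hpre⟩ | ⟨p, hp, hinf⟩)
      · exact ⟨p, hp, hpre.isInfix⟩
      · exact ⟨p, hp, hinf.trans (List.infix_cons (List.infix_refl t))⟩
    · rintro ⟨p, hp, hinf⟩
      rcases List.infix_cons_iff.mp hinf with hpre | hinf'
      · exact Or.inl ⟨p, hp, hpre⟩
      · exact Or.inr ⟨p, hp, hinf'⟩

-- A's index-and-slice search decides List.IsInfix for a non-empty pattern.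
theorem ics_iff (p s : List String) (hp : p ≠ []) :
    is_consecutive_subsequence p s = true ↔ p <:+: s := by
  unfold is_consecutive_subsequence
  rw [if_neg (by simpa using hp)]
  by_cases hlen : p.length > s.length
  · rw [if_pos hlen]
    simp only [Bool.false_eq_true, false_iff]
    intro hinf
    exact absurd hinf.length_le (by omega)
  · rw [if_neg hlen]
    simp only [List.any_eq_true, PySem.List.mem_pyRange_one, beq_iff_eq]
    constructor
    · rintro ⟨i, ⟨hi0, _⟩, hsl⟩
      obtain ⟨k, rfl⟩ : ∃ k : Nat, i = (k : Int) := ⟨i.toNat, (Int.toNat_of_nonneg hi0).symm⟩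
      rw [PySem.List.slice_natCast_add] at hsl
      have hpre : p <+: s.drop k := hsl ▸ List.take_prefix _ _
      exact List.infix_iff_prefix_suffix.mpr ⟨s.drop k, hpre, List.drop_suffix k s⟩
    · intro hinf
      obtain ⟨t, hpre, hsuf⟩ := List.infix_iff_prefix_suffix.mp hinf
      obtain ⟨k, rfl⟩ : ∃ k : Nat, t = s.drop k :=
        ⟨s.length - t.length, List.suffix_iff_eq_drop.mp hsuf⟩
      have hkm : k + p.length ≤ s.length := by
        have h1 := hpre.length_le
        have h2 : 0 < p.length := List.length_pos_of_ne_nil hp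
        simp only [List.length_drop] at h1
        omega
      refine ⟨(k : Int), ⟨by omega, by omega⟩, ?_⟩
      rw [PySem.List.slice_natCast_add]
      exact (List.prefix_iff_eq_take.mp hpre).symm

-- "all sublists empty" (A's test) coincides with "the non-empty filter is empty" (B's test).
theorem all_empty_iff (nl : List (List String)) :
    (nl.all (fun sublist => sublist.length = 0)) = (nl.filter (fun p => !p.isEmpty)).isEmpty := by
  rw [Bool.eq_iff_iff]
  simp [List.all_eq_true, List.isEmpty_iff, List.filter_eq_nil_iff, List.length_eq_zero_iff]

-- ===== VERDICT (by name: the statement is the Claim_ definition above) =====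
theorem contains_any_from_nested_lists_spec : Claim_equal_contains_any_from_nested_lists := by
  intro sl nl _
  unfold Spec_contains_any_from_nested_lists contains_any_from_nested_lists
    contains_any_from_nested_lists_alt
  by_cases h0 : nl.isEmpty
  · simp [h0]
  · rw [if_neg h0, if_neg h0]
    by_cases h1 : (nl.filter (fun p => !p.isEmpty)).isEmpty
    · rw [if_pos h1, if_pos (by rw [all_empty_iff]; exact h1)]
    · rw [if_neg h1, if_neg (by rw [all_empty_iff]; exact h1)]
      have hne : ∀ p ∈ nl.filter (fun p => !p.isEmpty), p ≠ [] := by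
        intro p hp
        have := List.of_mem_filter hp
        simpa [List.isEmpty_iff] using this
      rw [Bool.eq_iff_iff, List.any_eq_true, pvScan_iff _ _ hne]
      constructor
      · rintro ⟨p, hp, hics⟩; exact ⟨p, hp, (ics_iff p sl (hne p hp)).mp hics⟩
      · rintro ⟨p, hp, hinf⟩; exact ⟨p, hp, (ics_iff p sl (hne p hp)).mpr hinf⟩
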